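-- pv_equiv track=rewrite | github.com/HAL86AI/sns-post-generator | src/platform_formatter.py | _format_note_headers
-- ===== SOURCE A (Python) =====
-- def _format_note_headers(content: str) -> str:
--     """note記事の見出しフォーマット"""
--     lines = content.split('\n')
--     formatted_lines = []
--
--     for line in lines:
--         if line.startswith('#'):
--             # 見出しレベルの調整（最大3レベルまで）
--             level = len(line) - len(line.lstrip('#'))
--             if level > 3:
--                 level = 3
--
--             header_text = line.lstrip('#').strip()
--             formatted_lines.append('#' * level + ' ' + header_text)
--         else:
--             formatted_lines.append(line)
--
--     return '\n'.join(formatted_lines)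
-- ===== SOURCE B (Python) =====
-- def _format_note_headers(content: str) -> str:
--     """note記事の見出しフォーマット — single manual scan, no split/lstrip/strip."""
--     pieces = []
--     i = 0
--     n = len(content)
--     while True:
--         j = content.find('\n', i)
--         end = n if j < 0 else j
--         if i < end and content[i] == '#':
--             k = i
--             while k < end and content[k] == '#':
--                 k += 1
--             a, b = k, end
--             while a < b and content[a].isspace():
--                 a += 1
--             while b > a and content[b - 1].isspace():
--                 b -= 1
--             pieces.append('#' * min(k - i, 3) + ' ' + content[a:b])
--         else:
--             pieces.append(content[i:end])
--         if j < 0: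
--             return '\n'.join(pieces)
--         i = j + 1
-- ===== Notes on version B (the rewrite author's own statement) =====
-- stated objective: alternative
-- what changed: Replaced A's line-list split plus per-line lstrip/strip/join pipeline with a single manual pointer scan over the whole string (find the next newline, count hashes and trim whitespace by index, emit pieces).
import Mathlib
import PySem

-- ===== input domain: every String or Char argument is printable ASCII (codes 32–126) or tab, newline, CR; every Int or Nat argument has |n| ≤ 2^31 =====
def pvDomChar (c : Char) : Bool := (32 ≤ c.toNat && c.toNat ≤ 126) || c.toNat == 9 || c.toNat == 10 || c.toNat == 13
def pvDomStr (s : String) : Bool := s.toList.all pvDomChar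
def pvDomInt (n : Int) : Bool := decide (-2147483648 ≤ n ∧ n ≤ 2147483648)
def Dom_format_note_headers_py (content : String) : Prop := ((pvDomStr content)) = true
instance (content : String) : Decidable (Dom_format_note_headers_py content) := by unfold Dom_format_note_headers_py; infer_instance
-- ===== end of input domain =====

-- B replaces A's split/lstrip/strip per-line pipeline with one manual pointer scan over the
-- whole string; same return value, proved equal on all of Dom (objective: alternative).

-- ===== PORT A =====
-- per-line body of A's for-loop
def fnhLine (line : List Char) : List Char :=
  if PySem.Chars.startswith line ['#'] then
    -- line.lstrip('#') : drop the leading '#' characters (exact for a one-char strip set)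
    let stripped := line.dropWhile (· == '#')
    let level0 := line.length - stripped.length
    let level := if level0 > 3 then 3 else level0
    let header := PySem.Chars.strip stripped
    List.replicate level '#' ++ ' ' :: header
  else line

def format_note_headers_py (content : String) : String :=
  String.mk (PySem.Chars.join ['\n']
    ((PySem.Chars.splitOn content.toList ['\n']).map fnhLine))

-- ===== PORT B =====
-- Source B's in-line rewrite of one line segment (the body between i and end)
def altFixLine (line : List Char) : List Char :=
  if line.headD ' ' = '#' then
    let hashes := line.takeWhile (· == '#')
    let body := line.dropWhile (· == '#')
    let trimmed := ((body.dropWhile PySem.Chars.isspace).reverse.dropWhile PySem.Chars.isspace).reverse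
    List.replicate (min hashes.length 3) '#' ++ ' ' :: trimmed
  else line

-- Source B's outer while-loop: take the segment before the next '\n', rewrite it, continue after
def altGo (cs : List Char) : List Char :=
  let line := cs.takeWhile (fun c => !(c == '\n'))
  match h : cs.dropWhile (fun c => !(c == '\n')) with
  | [] => altFixLine line
  | _ :: r => altFixLine line ++ '\n' :: altGo r
termination_by cs.length
decreasing_by
  have hle : (cs.dropWhile (fun c => !(c == '\n'))).length ≤ cs.length :=
    List.length_dropWhile_le _ _
  rw [h] at hle
  simp at hle
  omega

def format_note_headers_py_alt (content : String) : String :=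
  String.mk (altGo content.toList)

-- ===== PRECONDITION & SPEC =====
def Spec_format_note_headers_py (content : String) (out : String) : Prop := out = format_note_headers_py_alt content
instance (content : String) (out : String) : Decidable (Spec_format_note_headers_py content out) := by unfold Spec_format_note_headers_py; infer_instance

-- ===== CLAIM (what is proved, stated in full; the proofs are below) =====
def Claim_equal_format_note_headers_py : Prop := ∀ (content : String), Dom_format_note_headers_py content → Spec_format_note_headers_py content (format_note_headers_py content)

-- ===== LEMMAS AND PROOFS =====

-- reference split of a char list at '\n' boundaries (keeps empty pieces, like str.split('\n'))
def splitNL (cs : List Char) : List (List Char) :=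
  match h : cs.dropWhile (fun c => !(c == '\n')) with
  | [] => [cs.takeWhile (fun c => !(c == '\n'))]
  | _ :: r => cs.takeWhile (fun c => !(c == '\n')) :: splitNL r
termination_by cs.length
decreasing_by
  have hle : (cs.dropWhile (fun c => !(c == '\n'))).length ≤ cs.length :=
    List.length_dropWhile_le _ _
  rw [h] at hle
  simp at hle
  omega

def consHead (x : List Char) : List (List Char) → List (List Char)
  | [] => [x]
  | h :: t => (x ++ h) :: t

theorem splitNL_ne_nil (cs : List Char) : splitNL cs ≠ [] := by
  unfold splitNL
  split <;> simp

theorem splitNL_of_dropWhile_nil (cs : List Char)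
    (h : cs.dropWhile (fun c => !(c == '\n')) = []) :
    splitNL cs = [cs.takeWhile (fun c => !(c == '\n'))] := by
  conv_lhs => unfold splitNL
  split
  · rfl
  · rename_i head r heq; rw [h] at heq; cases heq

theorem splitNL_of_dropWhile_cons (cs : List Char) (x : Char) (r : List Char)
    (h : cs.dropWhile (fun c => !(c == '\n')) = x :: r) :
    splitNL cs = cs.takeWhile (fun c => !(c == '\n')) :: splitNL r := by
  conv_lhs => unfold splitNL
  split
  · rename_i heq; rw [h] at heq; cases heq
  · rename_i head r' heq
    rw [h] at heq
    injection heq with h1 h2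
    rw [h2]

theorem altGo_of_dropWhile_nil (cs : List Char)
    (h : cs.dropWhile (fun c => !(c == '\n')) = []) :
    altGo cs = altFixLine (cs.takeWhile (fun c => !(c == '\n'))) := by
  conv_lhs => unfold altGo
  split
  · rfl
  · rename_i head r heq; rw [h] at heq; cases heq

theorem altGo_of_dropWhile_cons (cs : List Char) (x : Char) (r : List Char)
    (h : cs.dropWhile (fun c => !(c == '\n')) = x :: r) :
    altGo cs = altFixLine (cs.takeWhile (fun c => !(c == '\n'))) ++ '\n' :: altGo r := by
  conv_lhs => unfold altGo
  split
  · rename_i heq; rw [h] at heq; cases heq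
  · rename_i head r' heq
    rw [h] at heq
    injection heq with h1 h2
    rw [h2]

theorem splitNL_nil : splitNL [] = [[]] := by
  rw [splitNL_of_dropWhile_nil [] rfl]
  rfl

theorem dropWhile_newline_cons (rest : List Char) :
    List.dropWhile (fun c => !(c == '\n')) ('\n' :: rest) = '\n' :: rest := rfl

theorem splitNL_newline (rest : List Char) : splitNL ('\n' :: rest) = [] :: splitNL rest := by
  rw [splitNL_of_dropWhile_cons ('\n' :: rest) '\n' rest (dropWhile_newline_cons rest)]
  rfl

theorem consHead_splitNL_cons (y : List Char) (c : Char) (rest : List Char)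
    (hc : (c == '\n') = false) :
    consHead y (splitNL (c :: rest)) = consHead (y ++ [c]) (splitNL rest) := by
  have hd : List.dropWhile (fun c => !(c == '\n')) (c :: rest)
      = List.dropWhile (fun c => !(c == '\n')) rest := by
    simp [hc]
  have ht : List.takeWhile (fun c => !(c == '\n')) (c :: rest)
      = c :: List.takeWhile (fun c => !(c == '\n')) rest := by
    simp [hc]
  rcases hdw : List.dropWhile (fun c => !(c == '\n')) rest with _ | ⟨x, r⟩
  · rw [splitNL_of_dropWhile_nil rest hdw, splitNL_of_dropWhile_nil (c :: rest) (hd.trans hdw), ht]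
    simp [consHead]
  · rw [splitNL_of_dropWhile_cons rest x r hdw,
      splitNL_of_dropWhile_cons (c :: rest) x r (hd.trans hdw), ht]
    simp [consHead]

theorem splitOn_go_nl (fuel : Nat) :
    ∀ (l cur : List Char) (acc : List (List Char)), l.length < fuel →
      PySem.Chars.splitOn.go ['\n'] fuel l cur acc
        = acc.reverse ++ consHead cur.reverse (splitNL l) := by
  induction fuel with
  | zero => intro l cur acc h; omega
  | succ fuel ih =>
    intro l cur acc h
    match l with
    | [] =>
      simp [PySem.Chars.splitOn.go, splitNL_nil, consHead]
    | c :: rest =>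
      by_cases hc : c = '\n'
      · subst hc
        have hpre : List.isPrefixOf ['\n'] ('\n' :: rest) = true := by
          simp [List.isPrefixOf]
        simp only [PySem.Chars.splitOn.go, hpre, if_pos]
        have hD : List.drop ['\n'].length ('\n' :: rest) = rest := rfl
        rw [hD, ih rest [] (cur.reverse :: acc) (by simp at h ⊢; omega)]
        rcases hs : splitNL rest with _ | ⟨y, t⟩
        · exact absurd hs (splitNL_ne_nil rest)
        · simp [consHead, splitNL_newline, hs]
      · have hpre : List.isPrefixOf ['\n'] (c :: rest) = false := by
          simp [List.isPrefixOf]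
          exact fun hh => hc hh.symm
        simp only [PySem.Chars.splitOn.go, hpre]
        norm_num
        rw [ih rest (c :: cur) acc (by simp at h ⊢; omega)]
        rw [consHead_splitNL_cons cur.reverse c rest (by simp [hc])]
        simp

theorem splitOn_eq_splitNL (cs : List Char) :
    PySem.Chars.splitOn cs ['\n'] = splitNL cs := by
  unfold PySem.Chars.splitOn
  rw [splitOn_go_nl (cs.length + 1) cs [] [] (by omega)]
  rcases h : splitNL cs with _ | ⟨x, t⟩
  · exact absurd h (splitNL_ne_nil cs)
  · simp [consHead]

theorem fnhLine_eq_altFixLine (line : List Char) : fnhLine line = altFixLine line := by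
  unfold fnhLine altFixLine
  rcases line with _ | ⟨c, t⟩
  · simp [PySem.Chars.startswith, List.isPrefixOf]
  · by_cases hc : c = '#'
    · subst hc
      have h1 : PySem.Chars.startswith ('#' :: t) ['#'] = true := by
        simp [PySem.Chars.startswith, List.isPrefixOf]
      have h2 : (('#' :: t).headD ' ' = '#') := rfl
      simp only [h1, if_pos, h2]
      have hsplit : (('#' :: t).takeWhile (· == '#')).length
          + (('#' :: t).dropWhile (· == '#')).length = ('#' :: t).length := by
        rw [← List.length_append, List.takeWhile_append_dropWhile]
      have hlen : ('#' :: t).length - (('#' :: t).dropWhile (· == '#')).length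
          = (('#' :: t).takeWhile (· == '#')).length := by omega
      rw [hlen]
      have hmin : ∀ n : Nat, (if n > 3 then 3 else n) = min n 3 := by
        intro n; split <;> omega
      rw [hmin]
      rfl
    · have h1 : PySem.Chars.startswith (c :: t) ['#'] = false := by
        simp [PySem.Chars.startswith, List.isPrefixOf]
        exact fun hh => hc hh.symm
      simp [h1, hc]

theorem altGo_eq_join (cs : List Char) :
    altGo cs = PySem.Chars.join ['\n'] ((splitNL cs).map altFixLine) := by
  rcases h : cs.dropWhile (fun c => !(c == '\n')) with _ | ⟨x, r⟩
  · rw [altGo_of_dropWhile_nil cs h, splitNL_of_dropWhile_nil cs h]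
    simp [PySem.Chars.join, List.intercalate]
  · rw [altGo_of_dropWhile_cons cs x r h, splitNL_of_dropWhile_cons cs x r h]
    rw [altGo_eq_join r]
    rcases h2 : splitNL r with _ | ⟨y, t⟩
    · exact absurd h2 (splitNL_ne_nil r)
    · simp [PySem.Chars.join, List.intercalate]
termination_by cs.length
decreasing_by
  have hle : (cs.dropWhile (fun c => !(c == '\n'))).length ≤ cs.length :=
    List.length_dropWhile_le _ _
  rw [h] at hle
  simp at hle
  omega

-- ===== VERDICT (by name: the statement is the Claim_ definition above) =====
theorem format_note_headers_py_spec : Claim_equal_format_note_headers_py := by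
  intro content _
  unfold Spec_format_note_headers_py format_note_headers_py format_note_headers_py_alt
  rw [splitOn_eq_splitNL, altGo_eq_join]
  congr 2
  exact List.map_congr_left (fun l _ => fnhLine_eq_altFixLine l)
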